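-- pv_equiv track=rewrite | github.com/yushyn-andriy/algo | competitions/onlinejudge/ch2/linear/11608/p11608.py | check
-- ===== SOURCE A (Python) =====
-- def check(created, needed, n_extra):
--     result = [False] * len(needed)
--     available = [0] * len(created)
--     available[0] = n_extra
--     for i in range(0, len(created) - 1):
--         available[i+1] = created[i]
--     for j in range(len(needed)):
--         need = needed[j]
--         avail = available[j]
--         if avail < need:
--             result[j] = False
--         else:
--             avail -= need
--             result[j] = True
--
--         if j < len(needed) - 1:
--             available[j+1] += avail
--             available[j] = 0
--     return result
-- ===== SOURCE B (Python) =====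
-- def check(created, needed, n_extra):
--     # Stage 1: cumulative income — funds[j] = n_extra + created[0] + ... + created[j-1].
--     funds = [n_extra]
--     for c in created[:len(needed) - 1]:
--         funds.append(funds[-1] + c)
--     # Stage 2: month j is affordable iff cumulative income minus money spent so far covers it.
--     result = []
--     spent = 0
--     for f, need in zip(funds, needed):
--         if f - spent >= need:
--             result.append(True)
--             spent += need
--         else:
--             result.append(False)
--     return result
-- ===== Notes on version B (the rewrite author's own statement) =====
-- stated objective: alternative
-- what changed: Instead of simulating the month-to-month carry in a mutated 'available' buffer, B precomputes a cumulative-income table (prefix sums of created seeded with n_extra) and then decides each month by the algebraic identity 'affordable iff cumulative income minus total spent so far covers the need', tracking only total spending.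
import Mathlib
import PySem

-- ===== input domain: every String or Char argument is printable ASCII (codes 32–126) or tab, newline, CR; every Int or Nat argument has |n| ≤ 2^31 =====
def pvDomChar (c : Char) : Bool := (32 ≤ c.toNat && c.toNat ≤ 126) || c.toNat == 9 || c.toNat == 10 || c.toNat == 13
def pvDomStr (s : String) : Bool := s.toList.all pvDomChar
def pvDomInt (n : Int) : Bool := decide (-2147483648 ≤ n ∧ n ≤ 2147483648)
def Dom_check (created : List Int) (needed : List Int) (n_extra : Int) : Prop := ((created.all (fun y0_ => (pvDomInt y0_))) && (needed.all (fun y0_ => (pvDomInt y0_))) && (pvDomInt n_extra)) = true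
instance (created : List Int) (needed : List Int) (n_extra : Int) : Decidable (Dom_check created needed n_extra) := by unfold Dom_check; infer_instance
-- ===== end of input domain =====

-- B replaces A's mutated carry buffer by a precomputed cumulative-income table plus a
-- total-spent accumulator ('affordable iff cumulative income − spent ≥ need'); same results on Pre_check.

-- ===== PORT A =====
-- 'for i in range(0, len(created) - 1): available[i+1] = created[i]'
-- (indexing is via getD; Pre_check guarantees every Python index access is in range)
def setupLoop (created : List Int) (i : Nat) (available : List Int) : List Int :=
  if i < created.length - 1 then
    setupLoop created (i+1) (available.set (i+1) (created.getD i 0))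
  else available
termination_by created.length - 1 - i

-- 'for j in range(len(needed)): …' of A, over the same state (result, available)
def mainLoop (needed : List Int) (j : Nat) (result : List Bool) (available : List Int) : List Bool :=
  if j < needed.length then
    let need := needed.getD j 0
    let avail := available.getD j 0
    let result' := if avail < need then result.set j false else result.set j true
    let avail' := if avail < need then avail else avail - need
    let available' :=
      if j < needed.length - 1 then
        (available.set (j+1) (available.getD (j+1) 0 + avail')).set j 0
      else available
    mainLoop needed (j+1) result' available'
  else result
termination_by needed.length - j

def check (created : List Int) (needed : List Int) (n_extra : Int) : List Bool :=
  let result := List.replicate needed.length false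
  let available := (List.replicate created.length (0 : Int)).set 0 n_extra
  let available := setupLoop created 0 available
  mainLoop needed 0 result available

-- ===== PORT B =====
-- Stage 1 of Source B: 'funds = [n_extra]; for c in created[:len(needed)-1]: funds.append(funds[-1] + c)'
def buildFunds (cs : List Int) (acc : Int) : List Int :=
  match cs with
  | [] => [acc]
  | c :: rest => acc :: buildFunds rest (acc + c)

-- Stage 2 of Source B: 'for f, need in zip(funds, needed): …' with the spent accumulator
def payLoop (pairs : List (Int × Int)) (spent : Int) : List Bool :=
  match pairs with
  | [] => []
  | (f, need) :: rest =>
    if need ≤ f - spent then true :: payLoop rest (spent + need)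
    else false :: payLoop rest spent

def check_alt (created : List Int) (needed : List Int) (n_extra : Int) : List Bool :=
  let funds := buildFunds (PySem.List.slice created none (some ((needed.length : Int) - 1))) n_extra
  payLoop (funds.zip needed) 0

-- ===== PRECONDITION & SPEC =====
-- Exactly the inputs on which Python A returns: an empty 'created' or a 'needed' longer
-- than 'created' makes A's available[...] accesses raise IndexError.
def Pre_check (created : List Int) (needed : List Int) (n_extra : Int) : Prop :=
  created ≠ [] ∧ needed.length ≤ created.length
instance (created : List Int) (needed : List Int) (n_extra : Int) : Decidable (Pre_check created needed n_extra) := by unfold Pre_check; infer_instance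

def pvWitness_check : List Int × List Int × Int := ([3, 1], [2, 4], 2)

def Spec_check (created : List Int) (needed : List Int) (n_extra : Int) (out : List Bool) : Prop := out = check_alt created needed n_extra
instance (created : List Int) (needed : List Int) (n_extra : Int) (out : List Bool) : Decidable (Spec_check created needed n_extra out) := by unfold Spec_check; infer_instance

-- ===== CLAIM (what is proved, stated in full; the proofs are below) =====
def Claim_equal_check : Prop := ∀ (created : List Int) (needed : List Int) (n_extra : Int), Dom_check created needed n_extra → Pre_check created needed n_extra → Spec_check created needed n_extra (check created needed n_extra)

-- ===== LEMMAS AND PROOFS =====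

-- Proof-side bridge: the month-by-month carry recurrence, used only to relate the two ports.
def altLoop (created : List Int) (needed : List Int) (j : Nat) (carry : Int) : List Bool :=
  match needed with
  | [] => []
  | need :: rest =>
    let ok := decide (need ≤ carry)
    let surplus := if need ≤ carry then carry - need else carry
    match rest with
    | [] => [ok]
    | _ :: _ => ok :: altLoop created rest (j+1) (created.getD j 0 + surplus)

lemma setupLoop_length (created : List Int) (i : Nat) (available : List Int) :
    (setupLoop created i available).length = available.length := by
  fun_induction setupLoop created i available with
  | case1 i available h ih => simpa using ih
  | case2 => rfl

lemma getD_set_ne (l : List Int) (i j : Nat) (a : Int) (h : i ≠ j) :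
    (l.set i a).getD j 0 = l.getD j 0 := by
  rw [List.getD_eq_getElem?_getD, List.getElem?_set_ne h, ← List.getD_eq_getElem?_getD]

lemma setupLoop_getD (created : List Int) (i : Nat) (available : List Int)
    (hlen : available.length = created.length) (k : Nat) :
    (setupLoop created i available).getD k 0 =
      if i + 1 ≤ k ∧ k + 1 ≤ created.length then created.getD (k-1) 0
      else available.getD k 0 := by
  fun_induction setupLoop created i available with
  | case1 i available h ih =>
    rw [ih (by simpa using hlen)]
    by_cases hk : i + 1 = k
    · subst hk
      rw [if_neg (by omega), if_pos ⟨le_refl _, by omega⟩]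
      rw [List.getD_eq_getElem?_getD, List.getElem?_set_self (by omega), Option.getD_some]
      simp
    · rw [getD_set_ne _ _ _ _ hk]
      have hiff : (i + 1 + 1 ≤ k ∧ k + 1 ≤ created.length) ↔ (i + 1 ≤ k ∧ k + 1 ≤ created.length) := by
        omega
      rw [if_congr hiff rfl rfl]
  | case2 i available h =>
    rw [if_neg (by omega)]

lemma take_set {α : Type} (l : List α) (j : Nat) (a : α) (h : j < l.length) :
    (l.set j a).take (j+1) = l.take j ++ [a] := by
  rw [List.set_eq_take_append_cons_drop, if_pos h, List.take_append]
  simp [List.take_take, Nat.min_eq_left h.le]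

lemma mainLoop_eq (needed created : List Int) (j : Nat) (result : List Bool)
    (available : List Int)
    (hr : result.length = needed.length)
    (hn : needed.length ≤ created.length)
    (ha : available.length = created.length)
    (hj : j ≤ needed.length)
    (hinv : ∀ k, j < k → k < needed.length → available.getD k 0 = created.getD (k-1) 0) :
    mainLoop needed j result available =
      result.take j ++ altLoop created (needed.drop j) j (available.getD j 0) := by
  fun_induction mainLoop needed j result available with
  | case1 j result available h need avail result' avail' available' ih =>
    have hdrop : needed.drop j = needed.getD j 0 :: needed.drop (j+1) := by
      rw [List.getD_eq_getElem (needed) 0 h]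
      exact (List.getElem_cons_drop h).symm
    have hres' : result'.length = needed.length := by
      simp only [result']; split_ifs <;> simpa using hr
    have htake : result'.take (j+1) = result.take j ++ [decide (needed.getD j 0 ≤ available.getD j 0)] := by
      simp only [result', need, avail]
      split_ifs with hlt
      · rw [take_set _ _ _ (by omega)]
        have : decide (needed.getD j 0 ≤ available.getD j 0) = false := by
          simp only [decide_eq_false_iff_not]; omega
        rw [this]
      · rw [take_set _ _ _ (by omega)]
        have : decide (needed.getD j 0 ≤ available.getD j 0) = true := by
          simp only [decide_eq_true_eq]; omega
        rw [this]
    have havail' : avail' = (if needed.getD j 0 ≤ available.getD j 0 then available.getD j 0 - needed.getD j 0 else available.getD j 0) := by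
      simp only [avail', need, avail]
      split_ifs <;> first | rfl | omega
    by_cases hlast : j < needed.length - 1
    · -- not the last month
      obtain ⟨x, xs, hxs⟩ : ∃ x xs, needed.drop (j+1) = x :: xs := by
        cases hx : needed.drop (j+1) with
        | nil =>
          exfalso
          have := congrArg List.length hx
          simp at this; omega
        | cons x xs => exact ⟨x, xs, rfl⟩
      have hav' : available'.length = created.length := by
        simp [available', hlast]; simpa using ha
      rw [ih hres' hav' (by omega) ?_]
      · have hgetj1 : available'.getD (j+1) 0 = created.getD j 0 + avail' := by
          simp only [available']; rw [dif_pos hlast]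
          rw [getD_set_ne _ j (j+1) _ (by omega)]
          rw [List.getD_eq_getElem?_getD, List.getElem?_set_self (by omega), Option.getD_some]
          rw [hinv (j+1) (by omega) (by omega)]
          simp
        rw [hgetj1, hdrop, hxs]
        have haltstep : altLoop created (needed.getD j 0 :: x :: xs) j (available.getD j 0)
            = (decide (needed.getD j 0 ≤ available.getD j 0)) ::
              altLoop created (x :: xs) (j+1)
                (created.getD j 0 + (if needed.getD j 0 ≤ available.getD j 0 then available.getD j 0 - needed.getD j 0 else available.getD j 0)) := by
          rfl
        rw [haltstep, htake, havail', ← hxs]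
        simp
      · intro k hk1 hk2
        simp only [available']; rw [dif_pos hlast]
        rw [getD_set_ne _ j k _ (by omega), getD_set_ne _ (j+1) k _ (by omega)]
        exact hinv k (by omega) hk2
    · -- last month: j = needed.length - 1
      have hav' : available' = available := by
        simp only [available']; rw [dif_neg hlast]
      rw [ih hres' (by rw [hav']; exact ha) (by omega) (by intro k hk1 hk2; omega)]
      have hdropnil : needed.drop (j+1) = [] := by
        have : j + 1 = needed.length := by omega
        rw [this]; simp
      rw [hdrop, hdropnil]
      have h1 : ∀ c : Int, altLoop created ([] : List Int) (j+1) c = [] := fun _ => rfl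
      have h2 : altLoop created [needed.getD j 0] j (available.getD j 0)
          = [decide (needed.getD j 0 ≤ available.getD j 0)] := rfl
      rw [h1, h2, htake]
      simp
  | case2 j result available h =>
    have hjeq : j = needed.length := by omega
    have hdropnil : needed.drop j = [] := by rw [hjeq]; simp
    rw [hdropnil]
    have : altLoop created [] j (available.getD j 0) = [] := rfl
    rw [this, List.append_nil, hjeq, ← hr, List.take_length]

-- B's two stages equal the carry recurrence: the carry is always 'funds − spent'.
lemma pay_eq_alt (created : List Int) :
    ∀ (needed : List Int) (j : Nat) (funds spent : Int),
      j + needed.length ≤ created.length + 1 →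
      payLoop ((buildFunds ((created.drop j).take (needed.length - 1)) funds).zip needed) spent
        = altLoop created needed j (funds - spent) := by
  intro needed
  induction needed with
  | nil => intro j funds spent _; simp [payLoop, altLoop, List.zip_nil_right]
  | cons need rest ih =>
    intro j funds spent hlen
    cases rest with
    | nil =>
      simp only [List.length_cons, List.length_nil, Nat.add_sub_cancel, List.take_zero]
      simp only [buildFunds, List.zip_cons_cons, List.zip_nil_right, payLoop, altLoop]
      split_ifs with h1
      · rw [show (decide (need ≤ funds - spent)) = true by simpa using h1]
      · rw [show (decide (need ≤ funds - spent)) = false by simpa using h1]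
    | cons r rs =>
      have hj : j < created.length := by simp at hlen; omega
      have hdropj : created.drop j = created[j] :: created.drop (j+1) :=
        (List.getElem_cons_drop hj).symm
      have hlen' : (need :: r :: rs).length - 1 = rs.length + 1 := by simp
      rw [hlen', hdropj, List.take_succ_cons]
      simp only [buildFunds, List.zip_cons_cons, payLoop]
      have hgetD : created.getD j 0 = created[j] := List.getD_eq_getElem created 0 hj
      have hstep : altLoop created (need :: r :: rs) j (funds - spent)
          = (decide (need ≤ funds - spent)) ::
            altLoop created (r :: rs) (j+1)
              (created.getD j 0 + (if need ≤ funds - spent then funds - spent - need else funds - spent)) := rfl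
      rw [hstep, hgetD]
      split_ifs with h1
      · rw [show (decide (need ≤ funds - spent)) = true by simpa using h1]
        have := ih (j+1) (funds + created[j]) (spent + need) (by simp at hlen ⊢; omega)
        simp only [List.length_cons, Nat.add_sub_cancel] at this
        rw [show funds + created[j] - (spent + need) = created[j] + (funds - spent - need) from by ring] at this
        rw [this]
      · rw [show (decide (need ≤ funds - spent)) = false by simpa using h1]
        have := ih (j+1) (funds + created[j]) spent (by simp at hlen ⊢; omega)
        simp only [List.length_cons, Nat.add_sub_cancel] at this
        rw [show funds + created[j] - spent = created[j] + (funds - spent) from by ring] at this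
        rw [this]

lemma check_alt_eq_altLoop (created needed : List Int) (n_extra : Int)
    (hn : needed.length ≤ created.length) :
    check_alt created needed n_extra = altLoop created needed 0 n_extra := by
  unfold check_alt
  cases needed with
  | nil => simp [payLoop, List.zip_nil_right, altLoop]
  | cons x xs =>
    have hslice : PySem.List.slice created none (some (((x :: xs).length : Int) - 1))
        = created.take ((x :: xs).length - 1) := by
      have : ((x :: xs).length : Int) - 1 = ((xs.length : Nat) : Int) := by simp
      rw [this, PySem.List.slice_to_natCast]
      simp
    rw [hslice]
    have := pay_eq_alt created (x :: xs) 0 n_extra 0 (by omega)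
    simpa using this

-- ===== VERDICT (by name: the statement is the Claim_ definition above) =====
theorem check_spec : Claim_equal_check := by
  intro created needed n_extra _ hpre
  obtain ⟨hne, hlen⟩ := hpre
  have hclen : 0 < created.length := List.length_pos_iff.mpr hne
  unfold Spec_check check
  set av0 : List Int := (List.replicate created.length (0 : Int)).set 0 n_extra with hav0
  have hav0len : av0.length = created.length := by simp [hav0]
  have hsetlen : (setupLoop created 0 av0).length = created.length := by
    rw [setupLoop_length]; exact hav0len
  rw [check_alt_eq_altLoop created needed n_extra hlen]
  rw [mainLoop_eq needed created 0 (List.replicate needed.length false) _ (by simp) hlen hsetlen (by omega) ?_]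
  · have hget0 : av0.getD 0 0 = n_extra := by
      simp only [hav0]
      rw [List.getD_eq_getElem?_getD, List.getElem?_set_self (by simpa using hclen), Option.getD_some]
    rw [setupLoop_getD created 0 av0 hav0len 0, if_neg (by omega), hget0]
    simp
  · intro k hk1 hk2
    rw [setupLoop_getD created 0 av0 hav0len k, if_pos ⟨by omega, by omega⟩]
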